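-- pv_equiv track=rewrite | github.com/Progambler227788/CP-CompetativeProgramming | 800 Ratings/1777.py | solve
-- ===== SOURCE A (Python) =====
-- def solve(n,array):
--     def checkParity(a,b):
--         if (a%2==0 and b%2==0) or (a&1 and b&1):
--             return True
--         return False
--     count = 0
--     if n == 1:
--       return count
--     for i in range(1,n):
--         if checkParity(array[i-1],array[i]):
--             count+=1
--     return count
-- ===== SOURCE B (Python) =====
-- def solve(n, array):
--     # fewer than two elements considered -> no adjacent pairs
--     if n <= 1:
--         return 0
--     # run-length encode the parities of the first n elements,
--     # then each maximal run of length L contributes L-1 same-parity pairs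
--     runs = []  # list of [parity, length]
--     for x in array[:n]:
--         p = x % 2
--         if runs and runs[-1][0] == p:
--             runs[-1][1] += 1
--         else:
--             runs.append([p, 1])
--     return sum(length - 1 for _, length in runs)
-- ===== Notes on version B (the rewrite author's own statement) =====
-- stated objective: alternative
-- what changed: B replaces A's indexed neighbour-by-neighbour parity comparison with a run-length encoding of parities over array[:n], summing (run length - 1) per maximal run.
import Mathlib
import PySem

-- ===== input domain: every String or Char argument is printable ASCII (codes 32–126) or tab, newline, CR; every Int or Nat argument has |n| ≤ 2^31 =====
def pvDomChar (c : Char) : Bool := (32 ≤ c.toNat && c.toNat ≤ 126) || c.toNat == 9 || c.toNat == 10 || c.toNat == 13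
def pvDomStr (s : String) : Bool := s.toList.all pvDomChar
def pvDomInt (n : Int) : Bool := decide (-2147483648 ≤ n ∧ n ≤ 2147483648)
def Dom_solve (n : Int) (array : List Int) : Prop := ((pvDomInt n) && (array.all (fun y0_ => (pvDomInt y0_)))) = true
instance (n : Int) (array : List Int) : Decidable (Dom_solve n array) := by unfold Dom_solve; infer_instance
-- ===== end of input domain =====

-- B replaces A's indexed adjacent-parity scan with run-length encoding of parities over
-- array[:n], summing (run length - 1) per run; equivalent wherever A returns (alternative, same cost).


-- ===== PORT A =====
def checkParity (a b : Int) : Bool :=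
  if (PySem.Int.mod a 2 == 0 && PySem.Int.mod b 2 == 0)
     || (PySem.Int.band a 1 != 0 && PySem.Int.band b 1 != 0) then true
  else false

def solve (n : Int) (array : List Int) : Int :=
  let count : Int := 0
  if n == 1 then count
  else
    (PySem.List.pyRange 1 n 1).foldl
      (fun count i =>
        if checkParity (PySem.List.pyGetD array (i - 1) 0) (PySem.List.pyGetD array i 0)
        then count + 1 else count) count

-- ===== PORT B =====
def runStep (runs : List (Int × Int)) (x : Int) : List (Int × Int) :=
  let p := PySem.Int.mod x 2
  match runs.getLast? with
  | some (q, c) => if q == p then runs.dropLast ++ [(q, c + 1)] else runs ++ [(p, 1)]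
  | none => [(p, 1)]

def solve_alt (n : Int) (array : List Int) : Int :=
  if n ≤ 1 then 0
  else
    let runs := (PySem.List.slice array none (some n)).foldl runStep []
    runs.foldl (fun acc r => acc + (r.2 - 1)) 0

-- ===== PRECONDITION & SPEC =====
-- Pre_ excludes exactly the inputs where A raises IndexError (n ≥ 2 with n > len(array)).
def Pre_solve (n : Int) (array : List Int) : Prop := n ≤ 1 ∨ n ≤ (array.length : Int)
instance (n : Int) (array : List Int) : Decidable (Pre_solve n array) := by
  unfold Pre_solve; infer_instance

def pvWitness_solve : Int × List Int := (4, [2, 4, 7, 9])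

def Spec_solve (n : Int) (array : List Int) (out : Int) : Prop := out = solve_alt n array
instance (n : Int) (array : List Int) (out : Int) : Decidable (Spec_solve n array out) := by unfold Spec_solve; infer_instance

-- ===== CLAIM (what is proved, stated in full; the proofs are below) =====
def Claim_equal_solve : Prop := ∀ (n : Int) (array : List Int), Dom_solve n array → Pre_solve n array → Spec_solve n array (solve n array)

-- ===== LEMMAS AND PROOFS =====

/-- Reference: number of adjacent same-parity pairs. -/
def pairCount : List Int → Int
  | a :: b :: t =>
      (if PySem.Int.mod a 2 == PySem.Int.mod b 2 then 1 else 0) + pairCount (b :: t)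
  | _ => 0

def sumC (rs : List (Int × Int)) : Int := rs.foldl (fun acc r => acc + (r.2 - 1)) 0

lemma mod_two_cases (a : Int) : PySem.Int.mod a 2 = 0 ∨ PySem.Int.mod a 2 = 1 := by
  have h1 := PySem.Int.mod_nonneg a (b := 2) (by norm_num)
  have h2 := PySem.Int.mod_lt a (b := 2) (by norm_num)
  omega

lemma checkParity_eq (a b : Int) :
    checkParity a b = (PySem.Int.mod a 2 == PySem.Int.mod b 2) := by
  unfold checkParity
  rw [PySem.Int.band_one, PySem.Int.band_one]
  rcases mod_two_cases a with h1 | h1 <;> rcases mod_two_cases b with h2 | h2 <;>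
    rw [h1, h2] <;> decide

lemma pairCount_snoc (l : List Int) (x : Int) :
    pairCount (l ++ [x]) = pairCount l +
      (match l.getLast? with
       | some y => (if PySem.Int.mod y 2 == PySem.Int.mod x 2 then (1 : Int) else 0)
       | none => 0) := by
  induction l with
  | nil => simp [pairCount]
  | cons a l ih =>
    cases l with
    | nil => simp [pairCount]
    | cons b t =>
      simp only [List.cons_append, pairCount] at *
      rw [ih]
      simp [List.getLast?_cons_cons]
      ring

lemma sumC_snoc (rs : List (Int × Int)) (r : Int × Int) :
    sumC (rs ++ [r]) = sumC rs + (r.2 - 1) := by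
  simp only [sumC, List.foldl_append, List.foldl_cons, List.foldl_nil]

/-- Invariant for the run-length fold. -/
lemma runs_invariant (l : List Int) (hl : l ≠ []) :
    (∃ c : Int, (l.foldl runStep []).getLast? =
        some (PySem.Int.mod (l.getLast?.getD 0) 2, c)) ∧
    sumC (l.foldl runStep []) = pairCount l := by
  induction l using List.reverseRecOn with
  | nil => exact absurd rfl hl
  | append_singleton l x ih =>
    rw [List.foldl_append, List.foldl_cons, List.foldl_nil]
    by_cases h : l = []
    · subst h
      refine ⟨⟨1, ?_⟩, ?_⟩ <;> simp [runStep, sumC, pairCount]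
    · obtain ⟨⟨c, hlast⟩, hsum⟩ := ih h
      set R := l.foldl runStep [] with hR
      obtain ⟨y, hy⟩ : ∃ y, l.getLast? = some y := by
        cases hll : l.getLast? with
        | none => exact absurd (List.getLast?_eq_none_iff.mp hll) h
        | some y => exact ⟨y, rfl⟩
      rw [hy] at hlast
      simp only [Option.getD_some] at hlast
      obtain ⟨P, hP⟩ := List.getLast?_eq_some_iff.mp hlast
      have hgl : (l ++ [x]).getLast? = some x := by simp
      have hpc := pairCount_snoc l x
      rw [hy] at hpc
      rw [hgl]
      simp only [Option.getD_some] at *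
      unfold runStep
      rw [hlast]
      by_cases hq : PySem.Int.mod y 2 = PySem.Int.mod x 2
      · simp only [hq, beq_self_eq_true, if_true]
        refine ⟨⟨c + 1, by simp⟩, ?_⟩
        have hPd : R.dropLast = P := by rw [hP]; exact List.dropLast_concat
        have hsumR : sumC P + (c - 1) = pairCount l := by
          rw [← hsum, hP, sumC_snoc]
        rw [hPd, sumC_snoc, hpc]
        simp only [hq, beq_self_eq_true, if_true]
        omega
      · have hq' : (PySem.Int.mod y 2 == PySem.Int.mod x 2) = false := by
          simp only [beq_eq_false_iff_ne, ne_eq]; exact hq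
        simp only [hq', Bool.false_eq_true, if_false]
        refine ⟨⟨1, by simp⟩, ?_⟩
        rw [sumC_snoc, hpc, hq']
        simp [hsum]

/-- A's loop over range(1, m) computes the pair count of the first m elements. -/
lemma loopA_eq (array : List Int) :
    ∀ (m : Nat), 1 ≤ m → m ≤ array.length →
    (PySem.List.pyRange 1 (m : Int) 1).foldl
      (fun count i =>
        if checkParity (PySem.List.pyGetD array (i - 1) 0) (PySem.List.pyGetD array i 0)
        then count + 1 else count) 0 = pairCount (array.take m) := by
  intro m
  induction m with
  | zero => omega
  | succ m ih =>
    intro _ hlen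
    by_cases hm : m = 0
    · subst hm
      rw [PySem.List.pyRange_one_eq_nil (by norm_num)]
      cases array with
      | nil => simp at hlen
      | cons a t => simp [pairCount]
    · have h1m : 1 ≤ m := Nat.one_le_iff_ne_zero.mpr hm
      have hmlen : m ≤ array.length := by omega
      have hrange : PySem.List.pyRange 1 ((m : Int) + 1) 1 =
          PySem.List.pyRange 1 (m : Int) 1 ++ [(m : Int)] := by
        exact PySem.List.pyRange_one_succ_right (by exact_mod_cast h1m)
      push_cast
      rw [hrange, List.foldl_append]
      simp only [List.foldl_cons, List.foldl_nil]
      rw [ih h1m hmlen]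
      have hgm : PySem.List.pyGetD array ((m : Int)) 0 = array.getD m 0 :=
        PySem.List.pyGetD_natCast array m 0
      have hgm1 : PySem.List.pyGetD array ((m : Int) - 1) 0 = array.getD (m - 1) 0 := by
        have : (m : Int) - 1 = ((m - 1 : Nat) : Int) := by omega
        rw [this]
        exact PySem.List.pyGetD_natCast array (m - 1) 0
      have htake : array.take (m + 1) = array.take m ++ [array.getD m 0] := by
        rw [List.take_add_one]
        congr 1
        rw [List.getElem?_eq_getElem (by omega)]
        simp [List.getD, List.getElem?_eq_getElem (show m < array.length by omega)]
      have hglast : (array.take m).getLast? = some (array.getD (m - 1) 0) := by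
        have hm1 : m - 1 < array.length := by omega
        have : array.take m = array.take (m - 1) ++ [array.getD (m - 1) 0] := by
          have : m = (m - 1) + 1 := by omega
          rw [this, List.take_add_one]
          congr 1
          rw [List.getElem?_eq_getElem hm1]
          simp [List.getD, List.getElem?_eq_getElem hm1]
        rw [this]
        simp
      rw [htake, pairCount_snoc, hglast, checkParity_eq, hgm, hgm1]
      split <;> simp_all [List.getD]

-- ===== VERDICT (by name: the statement is the Claim_ definition above) =====
theorem solve_spec : Claim_equal_solve := by
  intro n array _ hpre
  unfold Spec_solve solve solve_alt
  by_cases hn1 : n ≤ 1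
  · have : ¬ (1 : Int) < n := by omega
    rw [if_pos hn1]
    by_cases he : n = 1
    · simp [he]
    · have : (n == 1) = false := by simp [he]
      rw [this]
      simp only [Bool.false_eq_true, if_false]
      rw [PySem.List.pyRange_one_eq_nil (by omega)]
      simp
  · have hn2 : 2 ≤ n := by omega
    have hlen : n ≤ (array.length : Int) := by
      rcases hpre with h | h
      · omega
      · exact h
    have hne : (n == 1) = false := by simp; omega
    rw [if_neg hn1, hne]
    simp only [Bool.false_eq_true, if_false]
    have hslice : PySem.List.slice array none (some n) = array.take n.toNat :=
      PySem.List.slice_to array (by omega)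
    obtain ⟨m, hm⟩ : ∃ m : Nat, n = (m : Int) := ⟨n.toNat, by omega⟩
    subst hm
    have h1m : 1 ≤ m := by exact_mod_cast (by omega : (1:Int) ≤ m)
    have hmlen : m ≤ array.length := by exact_mod_cast hlen
    rw [loopA_eq array m h1m hmlen, hslice]
    rw [Int.toNat_natCast]
    have hne' : array.take m ≠ [] := by
      have hlen' : (array.take m).length = m := by
        rw [List.length_take]; omega
      intro hnil
      rw [hnil] at hlen'
      simp at hlen'
      omega
    have := (runs_invariant (array.take m) hne').2
    unfold sumC at this
    exact this.symm
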